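-- pv_equiv track=rewrite | github.com/gurugurugum/Python | lisp.py | getOneStatement
-- ===== SOURCE A (Python) =====
-- def findLastLeftBracketOfContinuingLeftBrackets(list, startPlace):
-- 	lbc = 0
-- 	lbp = startPlace
-- 	while(list[lbp] == "("):
-- 		lbc += 1
-- 		lbp += 1
-- 	lbp -= 1
-- 	return [lbc, lbp]
--
-- def findRightBracket(list, startPlace):
-- 	lbc = 0
-- 	rbp = startPlace
-- 	while(list[rbp] != ")"):
-- 		if list[rbp] == "(":
-- 			lbc += 1
-- 		rbp += 1
-- 	return [lbc, rbp]
--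
-- def isFloat(str):
-- 	try:
-- 		float(str)
-- 		return True
-- 	except ValueError:
-- 		return False
--
-- def getOneStatement(list):
-- 	if isFloat(list[0]):
-- 		return [list[0]]
-- 	tmp = findLastLeftBracketOfContinuingLeftBrackets(list, 0)
-- 	lbc = tmp[0] #"("の数
-- 	lbp = tmp[1] #最後に読んだ"("の場所
-- 	place = lbp
--
-- 	while lbc > 0:
-- 		tmp = findRightBracket(list, place + 1)
-- 		lbc += tmp[0] - 1
-- 		place = tmp[1]
--
-- 	return list[0:place + 1]
-- ===== SOURCE B (Python) =====
-- def isFloat(str):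
-- 	try:
-- 		float(str)
-- 		return True
-- 	except ValueError:
-- 		return False
--
-- def getOneStatement(list):
-- 	if isFloat(list[0]):
-- 		return [list[0]]
-- 	if list[0] != "(":
-- 		return []
-- 	out = []
-- 	depth = 0
-- 	for tok in list:
-- 		out.append(tok)
-- 		if tok == "(":
-- 			depth += 1
-- 		elif tok == ")":
-- 			depth -= 1
-- 		if depth == 0:
-- 			return out
-- ===== Notes on version B (the rewrite author's own statement) =====
-- stated objective: simpler
-- what changed: Replaced A's nested outer-loop machinery (findLastLeftBracketOfContinuingLeftBrackets plus repeated findRightBracket inner scans over an index) by one plain for-loop that appends each token to the output while tracking a running bracket depth and returns the accumulated list as soon as the depth hits zero.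
import Mathlib
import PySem

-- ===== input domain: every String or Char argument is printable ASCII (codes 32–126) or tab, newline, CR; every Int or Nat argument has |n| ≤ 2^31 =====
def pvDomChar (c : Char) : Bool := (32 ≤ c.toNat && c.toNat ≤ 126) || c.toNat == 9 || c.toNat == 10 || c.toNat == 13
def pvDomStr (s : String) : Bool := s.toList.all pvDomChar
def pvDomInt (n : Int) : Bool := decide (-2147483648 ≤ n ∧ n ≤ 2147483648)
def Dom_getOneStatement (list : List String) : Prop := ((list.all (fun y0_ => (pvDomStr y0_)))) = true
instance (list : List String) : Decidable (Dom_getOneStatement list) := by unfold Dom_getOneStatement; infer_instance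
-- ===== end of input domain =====

-- B replaces A's nested index machinery (left-bracket run + repeated right-bracket scans)
-- by one for-loop appending tokens while tracking a running depth (objective: simpler);
-- return values agree on all of Pre_.

-- ===== PORT A =====

-- A's isFloat: model of Python float(str) acceptance as recursive-descent parsing,
-- exact on printable-ASCII + tab/newline/CR strings: strip whitespace, optional sign,
-- then inf/infinity/nan (case-insensitive) or [digits][.digits][exponent] with
-- underscores allowed only between digits.
def pvIsWs (c : Char) : Bool := c = ' ' || c = '\t' || c = '\n' || c = '\r' || c = '\x0b' || c = '\x0c'

-- consume (_? digit)* after an initial digit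
def pvEatDigits : List Char → List Char
  | [] => []
  | '_' :: c :: r => if c.isDigit then pvEatDigits r else '_' :: c :: r
  | c :: r => if c.isDigit then pvEatDigits r else c :: r
  termination_by l => l.length

-- digitpart: digit (_? digit)*; returns the unconsumed remainder
def pvDigitpart? : List Char → Option (List Char)
  | c :: r => if c.isDigit then some (pvEatDigits r) else none
  | [] => none

-- exponent tail after 'e'/'E': optional sign then a digitpart consuming everything
def pvAfterExp (cs : List Char) : Bool :=
  let cs' := match cs with
    | c :: r => if c = '+' ∨ c = '-' then r else c :: r
    | [] => []
  match pvDigitpart? cs' with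
  | some rest => rest.isEmpty
  | none => false

-- mantissa: '.' digitpart | digitpart ['.' [digitpart]]
def pvMantissa? (cs : List Char) : Option (List Char) :=
  match cs with
  | '.' :: r => pvDigitpart? r
  | _ =>
    match pvDigitpart? cs with
    | none => none
    | some rest =>
      match rest with
      | '.' :: r2 => some ((pvDigitpart? r2).getD r2)
      | _ => some rest

def pvFloatBody (cs : List Char) : Bool :=
  let low := cs.map Char.toLower
  if low = "inf".toList ∨ low = "infinity".toList ∨ low = "nan".toList then true
  else
    match pvMantissa? cs with
    | none => false
    | some rest =>
      match rest with
      | [] => true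
      | c :: r => if c = 'e' ∨ c = 'E' then pvAfterExp r else false

def pvIsFloat (s : String) : Bool :=
  let cs := ((s.toList.dropWhile pvIsWs).reverse.dropWhile pvIsWs).reverse
  let cs := match cs with
    | c :: r => if c = '+' ∨ c = '-' then r else c :: r
    | [] => []
  pvFloatBody cs

-- findLastLeftBracketOfContinuingLeftBrackets: fueled (the Python raises IndexError when
-- it runs off the list; those inputs lie outside Pre_)
def pvFindLLB (l : List String) (lbc lbp : Int) : Nat → Int × Int
  | 0 => (lbc, lbp - 1)
  | fuel+1 =>
    match PySem.List.pyGet? l lbp with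
    | some s => if s = "(" then pvFindLLB l (lbc+1) (lbp+1) fuel else (lbc, lbp - 1)
    | none => (lbc, lbp - 1)

-- findRightBracket: fueled likewise
def pvFindRB (l : List String) (lbc rbp : Int) : Nat → Int × Int
  | 0 => (lbc, rbp)
  | fuel+1 =>
    match PySem.List.pyGet? l rbp with
    | some s =>
      if s ≠ ")" then pvFindRB l (if s = "(" then lbc + 1 else lbc) (rbp + 1) fuel
      else (lbc, rbp)
    | none => (lbc, rbp)

-- the 'while lbc > 0' loop of A
def pvALoop (l : List String) (lbc place : Int) : Nat → Int
  | 0 => place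
  | fuel+1 =>
    if lbc > 0 then
      let t := pvFindRB l 0 (place + 1) (l.length + 1)
      pvALoop l (lbc + t.1 - 1) t.2 fuel
    else place

def getOneStatement (list : List String) : List String :=
  match list with
  | [] => []   -- list[0] raises IndexError in Python: outside Pre_
  | s :: _ =>
    if pvIsFloat s then [s]
    else
      let t := pvFindLLB list 0 0 (list.length + 1)
      let place := pvALoop list t.1 t.2 (list.length + 1)
      PySem.List.slice list (some 0) (some (place + 1))

-- ===== PORT B =====

-- B's isFloat: model of the same Python float(str) acceptance, written as a split-based
-- recognizer over list predicates (trim, strip sign, special words, split at the first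
-- exponent letter and at the first dot, digit runs checked by all/zip); exact on the
-- same printable-ASCII + tab/newline/CR strings.
def bWs (c : Char) : Bool := [' ', '\t', '\n', '\r', '\x0b', '\x0c'].contains c

def bSignless (l : List Char) : List Char :=
  if ['+', '-'].contains (l.headD 'x') then l.tail else l

-- digit (('_')? digit)* : nonempty, chars are digits or underscores, ends are digits,
-- no two adjacent underscores
def bRun (l : List Char) : Bool :=
  !l.isEmpty && l.all (fun c => c.isDigit || c = '_') &&
  (l.headD '_').isDigit && (l.getLastD '_').isDigit &&
  (l.zip l.tail).all (fun p => p.1.isDigit || p.2.isDigit)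

def bMant (l : List Char) : Bool :=
  if l.contains '.' then
    let a := l.takeWhile (fun c => c ≠ '.')
    let b := (l.dropWhile (fun c => c ≠ '.')).tail
    if a.isEmpty then bRun b else bRun a && (b.isEmpty || bRun b)
  else bRun l

def bBody (l : List Char) : Bool :=
  ["inf".toList, "infinity".toList, "nan".toList].contains (l.map Char.toLower) ||
  (if l.any (fun c => c = 'e' || c = 'E') then
    bMant (l.takeWhile (fun c => c ≠ 'e' && c ≠ 'E')) &&
      bRun (bSignless ((l.dropWhile (fun c => c ≠ 'e' && c ≠ 'E')).tail))
  else bMant l)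

def bFloat (s : String) : Bool :=
  bBody (bSignless (((s.toList.dropWhile bWs).reverse.dropWhile bWs).reverse))

-- the for-loop of B: append each token, track the depth, return when it hits zero
def bGather (depth : Int) (out : List String) : List String → List String
  | [] => out.reverse   -- Python's for-loop falls off the end here (unbalanced): outside Pre_
  | tok :: rest =>
    let d := if tok = "(" then depth + 1 else if tok = ")" then depth - 1 else depth
    if d = 0 then (tok :: out).reverse else bGather d (tok :: out) rest

def getOneStatement_alt (list : List String) : List String :=
  match list with
  | [] => []   -- list[0] raises IndexError in Python: outside Pre_
  | s :: _ =>
    if bFloat s then [s]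
    else if s ≠ "(" then []
    else bGather 0 [] list

-- ===== PRECONDITION & SPEC =====

-- running bracket balance of a token list (closed-form; used only to state Pre_)
def pvBal (xs : List String) : Int :=
  xs.foldl (fun d s => if s = "(" then d + 1 else if s = ")" then d - 1 else d) 0

-- Pre_ excludes exactly the inputs on which A raises IndexError: the empty list, and a
-- head token "(" whose bracket statement is never closed within the list (a "(" head is
-- never float-like, so no float condition is needed).
def Pre_getOneStatement (list : List String) : Prop :=
  list ≠ [] ∧ (list.headD "" = "(" →
    ∃ k ∈ List.range list.length, pvBal (list.take (k+1)) = 0)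

instance (list : List String) : Decidable (Pre_getOneStatement list) := by
  unfold Pre_getOneStatement; infer_instance

def pvWitness_getOneStatement : List String := ["(", "x", ")"]

def Spec_getOneStatement (list : List String) (out : List String) : Prop := out = getOneStatement_alt list
instance (list : List String) (out : List String) : Decidable (Spec_getOneStatement list out) := by unfold Spec_getOneStatement; infer_instance

-- ===== CLAIM (what is proved, stated in full; the proofs are below) =====
def Claim_equal_getOneStatement : Prop := ∀ (list : List String), Dom_getOneStatement list → Pre_getOneStatement list → Spec_getOneStatement list (getOneStatement list)

-- ===== LEMMAS AND PROOFS =====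

-- ---- float-model equivalence: pvIsFloat = bFloat ----

theorem eat_suffix (t : List Char) : pvEatDigits t <:+ t := by
  induction t using pvEatDigits.induct with
  | case1 => simp [pvEatDigits]
  | case2 c r h ih =>
    rw [pvEatDigits, if_pos h]
    exact ih.trans ⟨['_', c], rfl⟩
  | case3 c r h =>
    rw [pvEatDigits, if_neg h]
  | case4 c r hne h ih =>
    rw [pvEatDigits.eq_def]
    split
    · simp
    · rename_i c2 r2 heq
      cases heq
      exact absurd (hne c2 r2 rfl rfl) (by simp)
    · rename_i c2 r2 heq
      cases heq
      rw [if_pos h]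
      exact ih.trans ⟨[c], rfl⟩
  | case5 c r hne h =>
    rw [pvEatDigits.eq_def]
    split
    · simp
    · rename_i c2 r2 heq
      cases heq
      exact absurd (hne c2 r2 rfl rfl) (by simp)
    · rename_i c2 r2 heq
      cases heq
      rw [if_neg h]

theorem bRun_zero_cons (c : Char) (r : List Char) (hc : c.isDigit = true) :
    bRun ('0' :: c :: r) = bRun ('0' :: r) := by
  cases r with
  | nil => simp [bRun, hc]
  | cons r0 r' => simp [bRun, hc]

theorem bRun_zero_underscore (c : Char) (r : List Char) (hc : c.isDigit = true) :
    bRun ('0' :: '_' :: c :: r) = bRun ('0' :: r) := by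
  cases r with
  | nil => simp [bRun, hc]
  | cons r0 r' => simp [bRun, hc]

theorem eat_nil_iff (t : List Char) : pvEatDigits t = [] ↔ bRun ('0' :: t) = true := by
  induction t using pvEatDigits.induct with
  | case1 => simp [pvEatDigits, bRun]
  | case2 c r h ih =>
    rw [pvEatDigits, if_pos h, bRun_zero_underscore c r h]
    exact ih
  | case3 c r h =>
    rw [pvEatDigits, if_neg h]
    have hb : bRun ('0' :: '_' :: c :: r) = false := by
      have h2 : c.isDigit = false := by revert h; cases c.isDigit <;> simp
      simp [bRun, h2]
    simp [hb]
  | case4 c r hne h ih =>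
    have he : pvEatDigits (c :: r) = pvEatDigits r := by
      rw [pvEatDigits.eq_def]
      split
      · rename_i heq; cases heq
      · rename_i c2 r2 heq; cases heq; exact absurd (hne c2 r2 rfl rfl) (by simp)
      · rename_i c2 r2 heq; cases heq; rw [if_pos h]
    rw [he, bRun_zero_cons c r h]
    exact ih
  | case5 c r hne h =>
    have h2 : c.isDigit = false := by revert h; cases c.isDigit <;> simp
    have he : pvEatDigits (c :: r) = c :: r := by
      rw [pvEatDigits.eq_def]
      split
      · rename_i heq; cases heq
      · rename_i c2 r2 heq; cases heq; exact absurd (hne c2 r2 rfl rfl) (by simp)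
      · rename_i c2 r2 heq; cases heq; rw [if_neg h]
    rw [he]
    by_cases hu : c = '_'
    · subst hu
      have hr : r = [] := by
        cases r with
        | nil => rfl
        | cons c2 r2 => exact absurd (hne c2 r2 rfl rfl) (by simp)
      subst hr
      simp [bRun]
    · simp [bRun, h, hu]

theorem bRun_digit_head (c : Char) (r : List Char) (hc : c.isDigit = true) :
    bRun (c :: r) = bRun ('0' :: r) := by
  cases r with
  | nil => simp [bRun, hc]
  | cons r0 r' => simp [bRun, hc]

theorem dp_some_nil (l : List Char) : pvDigitpart? l = some [] ↔ bRun l = true := by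
  cases l with
  | nil => simp [pvDigitpart?, bRun]
  | cons c r =>
    by_cases hc : c.isDigit = true
    · rw [pvDigitpart?, if_pos hc, bRun_digit_head c r hc]
      simpa using eat_nil_iff r
    · have hc' : c.isDigit = false := by revert hc; cases c.isDigit <;> simp
      rw [pvDigitpart?, if_neg hc]
      simp [bRun, hc']

theorem dp_none_run (l : List Char) (h : pvDigitpart? l = none) : bRun l = false := by
  by_contra hb
  have hb' : bRun l = true := by revert hb; cases bRun l <;> simp
  rw [← dp_some_nil] at hb'
  rw [h] at hb'
  cases hb'

theorem eat_under (c : Char) (r : List Char) (h : c.isDigit = true) :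
    pvEatDigits ('_' :: c :: r) = pvEatDigits r := by
  rw [pvEatDigits, if_pos h]

theorem eat_cons (c : Char) (r : List Char)
    (h : c = '_' → ∀ c2 r2, r = c2 :: r2 → c2.isDigit = false) :
    pvEatDigits (c :: r) = if c.isDigit then pvEatDigits r else c :: r := by
  rw [pvEatDigits.eq_def]
  split
  · rename_i heq; cases heq
  · rename_i c2 r2 heq; cases heq
    rw [h rfl c2 r2 rfl]
    have : ('_' : Char).isDigit = false := by decide
    rw [this]
    simp
  · rename_i c2 r2 heq; cases heq; rfl

theorem eat_append (t s : List Char) (hs : ∀ c ∈ s.head?, c.isDigit = false ∧ c ≠ '_') :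
    pvEatDigits (t ++ s) = pvEatDigits t ++ s := by
  induction t using pvEatDigits.induct with
  | case1 =>
    cases s with
    | nil => simp [pvEatDigits]
    | cons c0 s' =>
      obtain ⟨h1, h2⟩ := hs c0 (by simp)
      simp only [List.nil_append]
      rw [eat_cons c0 s' (fun hu => absurd hu h2), if_neg (by simp [h1]), pvEatDigits]
      simp
  | case2 c r h ih =>
    simp only [List.cons_append]
    rw [eat_under c (r ++ s) h, eat_under c r h]
    exact ih
  | case3 c r h =>
    have h2 : c.isDigit = false := by revert h; cases c.isDigit <;> simp
    simp only [List.cons_append]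
    rw [eat_cons '_' (c :: (r ++ s)) (fun _ c2 r2 he => by cases he; exact h2),
        eat_cons '_' (c :: r) (fun _ c2 r2 he => by cases he; exact h2)]
    simp
  | case4 c r hne h ih =>
    have hcu : c ≠ '_' := fun hu => by
      subst hu
      exact absurd h (by simp)
    simp only [List.cons_append]
    rw [eat_cons c (r ++ s) (fun hu => absurd hu hcu),
        eat_cons c r (fun hu => absurd hu hcu), if_pos h, if_pos h]
    exact ih
  | case5 c r hne h =>
    have h2 : c.isDigit = false := by revert h; cases c.isDigit <;> simp
    by_cases hu : c = '_'
    · subst hu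
      have hr : r = [] := by
        cases r with
        | nil => rfl
        | cons c2 r2 => exact absurd (hne c2 r2 rfl rfl) (by simp)
      subst hr
      cases s with
      | nil => simp
      | cons c0 s' =>
        obtain ⟨h1, h2⟩ := hs c0 (by simp)
        simp only [List.cons_append, List.nil_append]
        rw [eat_cons '_' (c0 :: s') (fun _ c2 r2 he => by cases he; exact h1)]
        rw [eat_cons '_' [] (fun _ c2 r2 he => by cases he)]
        simp
    · simp only [List.cons_append]
      rw [eat_cons c (r ++ s) (fun hx => absurd hx hu),
          eat_cons c r (fun hx => absurd hx hu), if_neg (by simp [h]), if_neg (by simp [h])]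
      simp

theorem dp_append (t s : List Char) (hs : ∀ c ∈ s.head?, c.isDigit = false ∧ c ≠ '_') :
    pvDigitpart? (t ++ s) = (pvDigitpart? t).map (· ++ s) := by
  cases t with
  | nil =>
    cases s with
    | nil => simp [pvDigitpart?]
    | cons c0 s' =>
      obtain ⟨h1, _⟩ := hs c0 (by simp)
      simp [pvDigitpart?, h1]
  | cons c r =>
    by_cases hc : c.isDigit = true
    · simp only [List.cons_append, pvDigitpart?, if_pos hc]
      rw [eat_append r s hs]
      simp
    · simp only [List.cons_append, pvDigitpart?, if_neg hc]
      simp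

theorem dp_rem_suffix (l r : List Char) (h : pvDigitpart? l = some r) : r <:+ l := by
  cases l with
  | nil => simp [pvDigitpart?] at h
  | cons c t =>
    by_cases hc : c.isDigit = true
    · rw [pvDigitpart?, if_pos hc] at h
      cases h
      exact (eat_suffix t).trans ⟨[c], rfl⟩
    · rw [pvDigitpart?, if_neg hc] at h
      cases h

theorem mant_rem_suffix (l r : List Char) (h : pvMantissa? l = some r) : r <:+ l := by
  rw [pvMantissa?.eq_def] at h
  split at h
  · rename_i r0
    exact List.IsSuffix.trans (dp_rem_suffix r0 r h) ⟨['.'], rfl⟩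
  · rename_i hne
    cases hdp : pvDigitpart? l with
    | none => rw [hdp] at h; cases h
    | some rest =>
      rw [hdp] at h
      have hrs := dp_rem_suffix l rest hdp
      simp only [] at h
      split at h
      · rename_i r2
        cases hdp2 : pvDigitpart? r2 with
        | none =>
          rw [hdp2] at h
          simp at h
          cases h
          exact List.IsSuffix.trans ⟨['.'], rfl⟩ hrs
        | some r3 =>
          rw [hdp2] at h
          simp at h
          cases h
          exact List.IsSuffix.trans (List.IsSuffix.trans (dp_rem_suffix r2 _ hdp2) ⟨['.'], rfl⟩) hrs
      · cases h
        exact hrs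

theorem dp_some_ne_nil (l r : List Char) (h : pvDigitpart? l = some r) : l ≠ [] := by
  intro he; subst he; simp [pvDigitpart?] at h

theorem mant_append (t s : List Char)
    (hs : ∀ c ∈ s.head?, c.isDigit = false ∧ c ≠ '_' ∧ c ≠ '.') (ht : t ≠ []) :
    pvMantissa? (t ++ s) = (pvMantissa? t).map (· ++ s) := by
  have hs' : ∀ c ∈ s.head?, c.isDigit = false ∧ c ≠ '_' := by
    intro c hc; obtain ⟨a, b, _⟩ := hs c hc; exact ⟨a, b⟩
  cases t with
  | nil => exact absurd rfl ht
  | cons c0 t0 =>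
    by_cases hdot0 : c0 = '.'
    · subst hdot0
      rw [show ('.' :: t0) ++ s = '.' :: (t0 ++ s) from rfl, pvMantissa?, pvMantissa?,
          dp_append t0 s hs']
    · have hm1 : pvMantissa? (c0 :: t0) =
          (match pvDigitpart? (c0 :: t0) with
            | none => none
            | some rest =>
              match rest with
              | '.' :: r2 => some ((pvDigitpart? r2).getD r2)
              | _ => some rest) := by
        rw [pvMantissa?.eq_def]
        split
        · rename_i heq; cases heq; exact absurd rfl hdot0
        · rfl
      have hm2 : pvMantissa? ((c0 :: t0) ++ s) =
          (match pvDigitpart? ((c0 :: t0) ++ s) with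
            | none => none
            | some rest =>
              match rest with
              | '.' :: r2 => some ((pvDigitpart? r2).getD r2)
              | _ => some rest) := by
        rw [pvMantissa?.eq_def]
        split
        · rename_i heq
          rw [show ((c0 :: t0) ++ s) = c0 :: (t0 ++ s) from rfl] at heq
          cases heq; exact absurd rfl hdot0
        · rfl
      rw [hm1, hm2, dp_append (c0 :: t0) s hs']
      cases hdp : pvDigitpart? (c0 :: t0) with
      | none => simp
      | some r =>
        have hrs : r <:+ (c0 :: t0) := dp_rem_suffix _ _ hdp
        simp only [Option.map_some]
        cases r with
        | nil =>
          simp only [List.nil_append]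
          cases s with
          | nil => simp
          | cons cs0 s0 =>
            obtain ⟨hd1, hd2, hd3⟩ := hs cs0 (by simp)
            split
            · rename_i heq
              rw [show cs0 :: s0 = cs0 :: s0 from rfl] at heq
              cases heq; exact absurd rfl hd3
            · rfl
        | cons rc rt =>
          by_cases hrc : rc = '.'
          · subst hrc
            simp only [List.cons_append]
            rw [dp_append rt s hs']
            cases hdp2 : pvDigitpart? rt with
            | none => simp
            | some u => simp
          · have e1 : (match (rc :: rt) ++ s with
                | '.' :: r2 => some ((pvDigitpart? r2).getD r2)
                | _ => some ((rc :: rt) ++ s)) = some ((rc :: rt) ++ s) := by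
              split
              · rename_i heq
                rw [show (rc :: rt) ++ s = rc :: (rt ++ s) from rfl] at heq
                cases heq; exact absurd rfl hrc
              · rfl
            have e2 : (match rc :: rt with
                | '.' :: r2 => some ((pvDigitpart? r2).getD r2)
                | _ => some (rc :: rt)) = some (rc :: rt) := by
              split
              · rename_i heq; cases heq; exact absurd rfl hrc
              · rfl
            rw [e1, e2]
            simp

theorem mant_dot (a b : List Char) (hane : a ≠ []) (hfree : ∀ c ∈ a, c ≠ '.') :
    pvMantissa? (a ++ '.' :: b) =
      (match pvDigitpart? a with
        | none => none
        | some [] => some ((pvDigitpart? b).getD b)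
        | some r => some (r ++ '.' :: b)) := by
  cases a with
  | nil => exact absurd rfl hane
  | cons a0 t0 =>
    have ha0 : a0 ≠ '.' := hfree a0 (by simp)
    have hdpa := dp_append (a0 :: t0) ('.' :: b)
      (by intro c hc; simp at hc; subst hc; exact ⟨by decide, by decide⟩)
    rw [pvMantissa?.eq_def]
    split
    · rename_i r0 heq
      rw [show (a0 :: t0) ++ '.' :: b = a0 :: (t0 ++ '.' :: b) from rfl] at heq
      cases heq
      exact absurd rfl ha0
    · rw [hdpa]
      cases hdp : pvDigitpart? (a0 :: t0) with
      | none => simp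
      | some r =>
        simp only [Option.map_some]
        cases r with
        | nil => simp
        | cons r0 rt =>
          have hr0 : r0 ≠ '.' := by
            intro he; subst he
            exact absurd (hfree '.' ((dp_rem_suffix _ _ hdp).mem (by simp))) (by simp)
          have e2 : (match (r0 :: rt) ++ '.' :: b with
              | '.' :: r2 => some ((pvDigitpart? r2).getD r2)
              | _ => some ((r0 :: rt) ++ '.' :: b)) = some ((r0 :: rt) ++ '.' :: b) := by
            split
            · rename_i heq
              rw [show (r0 :: rt) ++ '.' :: b = r0 :: (rt ++ '.' :: b) from rfl] at heq
              cases heq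
              exact absurd rfl hr0
            · rfl
          rw [e2]

theorem bRun_false_of_dp (l r : List Char) (hdp : pvDigitpart? l = some r) (hr : r ≠ []) :
    bRun l = false := by
  by_contra hx
  have hx' : bRun l = true := by revert hx; cases bRun l <;> simp
  rw [← dp_some_nil, hdp] at hx'
  exact hr (by cases hx'; rfl)

theorem mant_some_nil (l : List Char) : pvMantissa? l = some [] ↔ bMant l = true := by
  by_cases hdot : l.contains '.' = true
  · have hd : l.dropWhile (fun c => c ≠ '.') ≠ [] := by
      intro he
      rw [List.dropWhile_eq_nil_iff] at he
      obtain ⟨c, hc, hceq⟩ := List.contains_iff_exists_mem_beq.mp hdot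
      have := he c hc
      simp at this hceq
      exact this hceq.symm
    have hhead : (l.dropWhile (fun c => c ≠ '.')).head hd = '.' := by
      have := List.head_dropWhile_not (fun c => c ≠ '.') hd
      simpa using this
    have h1 : l.dropWhile (fun c => c ≠ '.') = '.' :: (l.dropWhile (fun c => c ≠ '.')).tail := by
      conv_lhs => rw [← List.cons_head_tail hd]
      rw [hhead]
    have hsplit : l = l.takeWhile (fun c => c ≠ '.') ++ '.' :: (l.dropWhile (fun c => c ≠ '.')).tail := by
      conv_lhs => rw [← List.takeWhile_append_dropWhile (p := fun c => c ≠ '.') (l := l), h1]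
    set a := l.takeWhile (fun c => c ≠ '.') with ha
    set b := (l.dropWhile (fun c => c ≠ '.')).tail with hb
    have hafree : ∀ c ∈ a, c ≠ '.' := by
      intro c hc
      have := List.mem_takeWhile_imp hc
      simpa using this
    by_cases haempty : a = []
    · have hl : l = '.' :: b := by rw [hsplit, haempty]; rfl
      rw [hl]
      rw [show pvMantissa? ('.' :: b) = pvDigitpart? b from by rw [pvMantissa?]]
      have hbm : bMant ('.' :: b) = bRun b := by
        simp [bMant]
      rw [hbm]
      exact dp_some_nil b
    · have hbm : bMant (a ++ '.' :: b) = (bRun a && (b.isEmpty || bRun b)) := by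
        have hcont : (a ++ '.' :: b).contains '.' = true := by
          simp [List.contains_append]
        have htwa : a.takeWhile (fun c => c ≠ '.') = a := by
          rw [List.takeWhile_eq_self_iff]
          intro c hc; simpa using hafree c hc
        have hdwa : a.dropWhile (fun c => c ≠ '.') = [] := by
          rw [List.dropWhile_eq_nil_iff]
          intro c hc; simpa using hafree c hc
        have htw : (a ++ '.' :: b).takeWhile (fun c => c ≠ '.') = a := by
          rw [List.takeWhile_append]
          split
          · rename_i hta
            rw [List.takeWhile_cons]
            simp
          · rename_i hta
            exact absurd (by rw [htwa]) hta
        have hdw : (a ++ '.' :: b).dropWhile (fun c => c ≠ '.') = '.' :: b := by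
          rw [List.dropWhile_append]
          split
          · rename_i hta
            rw [List.dropWhile_cons]
            simp
          · rename_i hta
            exact absurd (by rw [hdwa]; simp) hta
        rw [bMant, if_pos hcont]
        simp only [htw, hdw, List.tail_cons]
        rw [if_neg (by simpa using haempty)]
      rw [hsplit, hbm, mant_dot a b haempty hafree]
      cases hdp : pvDigitpart? a with
      | none =>
        have hra : bRun a = false := dp_none_run a hdp
        simp [hra]
      | some r =>
        cases r with
        | nil =>
          have hra : bRun a = true := (dp_some_nil a).mp hdp
          simp only [hra, Bool.true_and]
          cases hdpb : pvDigitpart? b with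
          | none =>
            by_cases hbe : b = []
            · simp [hbe]
            · have hrb : bRun b = false := dp_none_run _ hdpb
              simp [hrb, List.isEmpty_iff, hbe]
          | some u =>
            have hbne : b ≠ [] := dp_some_ne_nil _ _ hdpb
            cases u with
            | nil =>
              have hrb : bRun b = true := (dp_some_nil b).mp hdpb
              simp [hrb]
            | cons u0 ut =>
              have hrb : bRun b = false := bRun_false_of_dp b _ hdpb (by simp)
              simp [hrb, List.isEmpty_iff, hbne]
        | cons r0 rt =>
          have hra : bRun a = false := bRun_false_of_dp a _ hdp (by simp)
          simp [hra]
  · have hdot' : l.contains '.' = false := by revert hdot; cases l.contains '.' <;> simp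
    have hnodot : ∀ c ∈ l, c ≠ '.' := by
      intro c hc he
      subst he
      rw [← List.elem_eq_contains] at hdot'
      have := List.elem_eq_true_of_mem hc
      rw [hdot'] at this
      cases this
    have hbm : bMant l = bRun l := by rw [bMant, if_neg (by rw [hdot']; simp)]
    rw [hbm]
    rw [pvMantissa?.eq_def]
    split
    · exact absurd (by simp) hdot
    · cases hdp : pvDigitpart? l with
      | none =>
        have := dp_none_run l hdp
        simp [this]
      | some r =>
        have hrs := dp_rem_suffix _ _ hdp
        cases r with
        | nil =>
          have := (dp_some_nil l).mp hdp
          simp [this]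
        | cons r0 rt =>
          have hr0 : r0 ≠ '.' := by
            intro he; subst he
            exact absurd (hnodot '.' (hrs.mem (by simp))) (by simp)
          have hra : bRun l = false := bRun_false_of_dp l _ hdp (by simp)
          change (match r0 :: rt with
              | '.' :: r2 => some ((pvDigitpart? r2).getD r2)
              | _ => some (r0 :: rt)) = some [] ↔ bRun l = true
          split
          · rename_i heq; cases heq; exact absurd rfl hr0
          · simp [hra]

theorem ws_eq : pvIsWs = bWs := by
  funext c
  simp only [bWs, pvIsWs, List.contains_eq_any_beq, List.any_cons, List.any_nil, Bool.or_false]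
  ac_rfl

theorem signless_eq (l : List Char) :
    (match l with
      | c :: r => if c = '+' ∨ c = '-' then r else c :: r
      | [] => []) = bSignless l := by
  cases l with
  | nil => simp [bSignless]
  | cons c r =>
    by_cases h : c = '+' ∨ c = '-'
    · rcases h with h | h <;> subst h <;> simp [bSignless]
    · push_neg at h
      simp [bSignless, h.1, h.2]

theorem afterExp_eq (x : List Char) : pvAfterExp x = bRun (bSignless x) := by
  rw [pvAfterExp.eq_def]
  simp only []
  rw [signless_eq x]
  cases hdp : pvDigitpart? (bSignless x) with
  | none =>
    have := dp_none_run _ hdp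
    simp [this]
  | some r =>
    cases r with
    | nil =>
      have := (dp_some_nil _).mp hdp
      simp [this]
    | cons r0 rt =>
      have := bRun_false_of_dp _ _ hdp (by simp)
      simp [this]

theorem bMant_of_mant (l : List Char) (h : pvMantissa? l ≠ some []) : bMant l = false := by
  by_contra hx
  have hx' : bMant l = true := by revert hx; cases bMant l <;> simp
  exact h ((mant_some_nil l).mpr hx')

theorem body_eq (l : List Char) : pvFloatBody l = bBody l := by
  rw [pvFloatBody, bBody]
  by_cases hspec : l.map Char.toLower = "inf".toList ∨ l.map Char.toLower = "infinity".toList ∨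
      l.map Char.toLower = "nan".toList
  · rw [if_pos hspec]
    have : (["inf".toList, "infinity".toList, "nan".toList].contains (l.map Char.toLower)) = true := by
      rcases hspec with h | h | h <;> simp [h]
    rw [this]
    simp
  · rw [if_neg hspec]
    have hcf : (["inf".toList, "infinity".toList, "nan".toList].contains (l.map Char.toLower)) = false := by
      by_contra hx
      have : (["inf".toList, "infinity".toList, "nan".toList].contains (l.map Char.toLower)) = true := by
        revert hx; cases (["inf".toList, "infinity".toList, "nan".toList].contains (l.map Char.toLower)) <;> simp
      simp at this
      rcases this with h | h | h
      · exact hspec (Or.inl h)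
      · exact hspec (Or.inr (Or.inl h))
      · exact hspec (Or.inr (Or.inr h))
    rw [hcf]
    simp only [Bool.false_or]
    by_cases hany : l.any (fun c => c = 'e' || c = 'E') = true
    · rw [if_pos hany]
      have hd : l.dropWhile (fun c => c ≠ 'e' && c ≠ 'E') ≠ [] := by
        intro he
        rw [List.dropWhile_eq_nil_iff] at he
        obtain ⟨c, hc, hce⟩ := List.any_eq_true.mp hany
        have := he c hc
        simp at this hce
        rcases hce with h | h
        · exact this.1 h
        · exact this.2 h
      have hec : (l.dropWhile (fun c => c ≠ 'e' && c ≠ 'E')).head hd = 'e' ∨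
          (l.dropWhile (fun c => c ≠ 'e' && c ≠ 'E')).head hd = 'E' := by
        by_contra hcon
        push_neg at hcon
        have := List.head_dropWhile_not (fun c => c ≠ 'e' && c ≠ 'E') hd
        rw [Bool.and_eq_false_iff] at this
        rcases this with h | h
        · exact absurd (by simpa using h) hcon.1
        · exact absurd (by simpa using h) hcon.2
      have h1 : l.dropWhile (fun c => c ≠ 'e' && c ≠ 'E') =
          (l.dropWhile (fun c => c ≠ 'e' && c ≠ 'E')).head hd ::
          (l.dropWhile (fun c => c ≠ 'e' && c ≠ 'E')).tail := by
        conv_lhs => rw [← List.cons_head_tail hd]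
      have hsplit : l = l.takeWhile (fun c => c ≠ 'e' && c ≠ 'E') ++
          (l.dropWhile (fun c => c ≠ 'e' && c ≠ 'E')).head hd ::
          (l.dropWhile (fun c => c ≠ 'e' && c ≠ 'E')).tail := by
        conv_lhs => rw [← List.takeWhile_append_dropWhile (p := fun c => c ≠ 'e' && c ≠ 'E') (l := l), h1]
      set m := l.takeWhile (fun c => c ≠ 'e' && c ≠ 'E') with hm
      set ec := (l.dropWhile (fun c => c ≠ 'e' && c ≠ 'E')).head hd with hecv
      set x := (l.dropWhile (fun c => c ≠ 'e' && c ≠ 'E')).tail with hx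
      have hmfree : ∀ c ∈ m, c ≠ 'e' ∧ c ≠ 'E' := by
        intro c hc
        have := List.mem_takeWhile_imp hc
        simp at this
        exact this
      have hecprop : ec ≠ '.' ∧ ec.isDigit = false ∧ ec ≠ '_' := by
        rcases hec with h | h <;> rw [h] <;> refine ⟨by decide, by decide, by decide⟩
      -- rewrite the B side's takeWhile/dropWhile through the split
      by_cases hme : m = []
      · have hl : l = ec :: x := by rw [hsplit, hme]; rfl
        have hmant : pvMantissa? l = none := by
          rw [hl, pvMantissa?.eq_def]
          split
          · rename_i r0 heq
            injection heq with hih _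
            exact (hecprop.1 hih).elim
          · rw [show pvDigitpart? (ec :: x) = none from by
              rw [pvDigitpart?, if_neg (by simp [hecprop.2.1])]]
        rw [hmant, hme]
        have : bMant [] = false := by simp [bMant, bRun]
        rw [this]
        simp
      · have hmant := mant_append m (ec :: x) (by
          intro c hc
          simp at hc
          subst hc
          exact ⟨hecprop.2.1, hecprop.2.2, hecprop.1⟩) hme
        rw [hsplit, hmant]
        cases hmm : pvMantissa? m with
        | none =>
          have hbm : bMant m = false := bMant_of_mant m (by rw [hmm]; simp)
          simp [hbm]
        | some r =>
          cases r with
          | nil =>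
            have hbm : bMant m = true := (mant_some_nil m).mp hmm
            simp only [Option.map_some, List.nil_append, hbm, Bool.true_and]
            rw [if_pos hec, afterExp_eq]
          | cons r0 rt =>
            have hbm : bMant m = false := bMant_of_mant m (by rw [hmm]; simp)
            have hr0 : r0 ≠ 'e' ∧ r0 ≠ 'E' :=
              hmfree r0 ((mant_rem_suffix m _ hmm).mem (by simp))
            simp only [Option.map_some, List.cons_append, hbm, Bool.false_and]
            rw [if_neg (by rintro (h | h) <;> [exact hr0.1 h; exact hr0.2 h])]
    · rw [if_neg hany]
      have hnoe : ∀ c ∈ l, c ≠ 'e' ∧ c ≠ 'E' := by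
        intro c hc
        constructor <;> intro he <;> subst he <;>
          exact hany (List.any_eq_true.mpr ⟨_, hc, by simp⟩)
      cases hmm : pvMantissa? l with
      | none =>
        have hbm : bMant l = false := bMant_of_mant l (by rw [hmm]; simp)
        simp [hbm]
      | some r =>
        cases r with
        | nil =>
          have hbm : bMant l = true := (mant_some_nil l).mp hmm
          simp [hbm]
        | cons r0 rt =>
          have hbm : bMant l = false := bMant_of_mant l (by rw [hmm]; simp)
          have hr0 := hnoe r0 ((mant_rem_suffix l _ hmm).mem (by simp))
          change (if r0 = 'e' ∨ r0 = 'E' then pvAfterExp rt else false) = bMant l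
          rw [if_neg (by rintro (h | h) <;> [exact hr0.1 h; exact hr0.2 h]), hbm]

theorem float_eq (s : String) : pvIsFloat s = bFloat s := by
  rw [pvIsFloat, bFloat, ws_eq, signless_eq, body_eq]

-- ---- balance bookkeeping (shared by the loop analyses) ----

def pvDelta (s : String) : Int := if s = "(" then 1 else if s = ")" then -1 else 0

theorem pvBal_concat (xs : List String) (a : String) :
    pvBal (xs ++ [a]) = pvBal xs + pvDelta a := by
  simp only [pvBal, pvDelta, List.foldl_append, List.foldl]
  split_ifs <;> omega

theorem pvBal_take_succ (l : List String) (n : Nat) (h : n < l.length) :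
    pvBal (l.take (n+1)) = pvBal (l.take n) + pvDelta l[n] := by
  have h2 : l.take (n+1) = l.take n ++ [l[n]] := by
    rw [List.take_add_one, List.getElem?_eq_getElem h]
    rfl
  rw [h2]
  exact pvBal_concat (l.take n) l[n]

-- balance is monotone over a ")"-free segment
theorem pvBal_mono (l : List String) (p : Nat) : ∀ (m : Nat),
    p + m ≤ l.length →
    (∀ j : Nat, p ≤ j → j < p + m → ∀ _ : j < l.length, l[j] ≠ ")") →
    pvBal (l.take p) ≤ pvBal (l.take (p + m)) := by
  intro m
  induction m with
  | zero => intro _ _; exact le_refl _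
  | succ m ih =>
    intro hlen hfree
    have h1 : p + m < l.length := by omega
    have hne : l[p+m] ≠ ")" := hfree (p+m) (by omega) (by omega) h1
    have hd : 0 ≤ pvDelta l[p+m] := by
      by_cases h' : l[p+m] = "("
      · simp [pvDelta, h']
      · simp [pvDelta, h', hne]
    have hstep := pvBal_take_succ l (p+m) h1
    have ihh := ih (by omega) (fun j a b c => hfree j a (by omega) c)
    have e : p + (m+1) = (p + m) + 1 := by omega
    rw [e]
    omega

-- length of the maximal prefix run satisfying a predicate
def pvRunLen (p : String → Bool) (l : List String) : Nat := (l.takeWhile p).length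

theorem pvRunLen_cons (p : String → Bool) (a : String) (t : List String) :
    pvRunLen p (a :: t) = if p a then pvRunLen p t + 1 else 0 := by
  simp only [pvRunLen, List.takeWhile_cons]
  split_ifs <;> simp

theorem pvRunLen_le (p : String → Bool) (l : List String) : pvRunLen p l ≤ l.length := by
  induction l with
  | nil => simp [pvRunLen]
  | cons a t ih =>
    rw [pvRunLen_cons]
    split_ifs <;> simp <;> omega

theorem pvRunLen_getElem (p : String → Bool) (l : List String) : ∀ (j : Nat),
    j < pvRunLen p l → ∀ h : j < l.length, p l[j] = true := by
  induction l with
  | nil => intro j hj; simp [pvRunLen] at hj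
  | cons a t ih =>
    intro j hj h
    rw [pvRunLen_cons] at hj
    by_cases hpa : p a = true
    · rw [if_pos hpa] at hj
      match j with
      | 0 => simpa using hpa
      | j+1 =>
        have hj' : j < pvRunLen p t := by omega
        have ht : j < t.length := by simpa using h
        have := ih j hj' ht
        simpa using this
    · rw [if_neg hpa] at hj; omega

theorem pvRunLen_boundary (p : String → Bool) (l : List String)
    (h : pvRunLen p l < l.length) : p (l[pvRunLen p l]'h) = false := by
  induction l with
  | nil => simp [pvRunLen] at h
  | cons a t ih =>
    by_cases hpa : p a = true
    · have hr : pvRunLen p (a :: t) = pvRunLen p t + 1 := by rw [pvRunLen_cons, if_pos hpa]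
      have h' : pvRunLen p t < t.length := by
        have := h; rw [hr] at this; simpa using this
      have := ih h'
      simp only [hr, List.getElem_cons_succ]
      exact this
    · have hpa' : p a = false := by revert hpa; cases p a <;> simp
      have hr : pvRunLen p (a :: t) = 0 := by rw [pvRunLen_cons, hpa']; simp
      simp only [hr, List.getElem_cons_zero]
      exact hpa'

theorem pvFindLLB_run (l : List String) : ∀ (m : Nat) (fuel : Nat) (c : Int) (p : Nat),
    (∀ j : Nat, j < m → ∀ _ : p + j < l.length, l[p+j] = "(") →
    (p + m = l.length ∨ (p + m < l.length ∧ ∀ _ : p + m < l.length, l[p+m] ≠ "(")) →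
    m + 1 ≤ fuel →
    pvFindLLB l c (↑p) fuel = (c + (m : Int), (p : Int) + (m : Int) - 1) := by
  intro m
  induction m with
  | zero =>
    intro fuel c p _ hb hfuel
    obtain ⟨f, rfl⟩ : ∃ f, fuel = f + 1 := ⟨fuel - 1, by omega⟩
    rcases hb with hb | ⟨hlt, hne⟩
    · have hnone : PySem.List.pyGet? l (↑p) = none := by
        rw [PySem.List.pyGet?_natCast]
        rw [List.getElem?_eq_none_iff]
        omega
      simp only [pvFindLLB, hnone]
      norm_num
    · have hsome : PySem.List.pyGet? l (↑p) = some (l[p]'(by omega)) := by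
        rw [PySem.List.pyGet?_natCast]
        exact List.getElem?_eq_getElem (by omega)
      have hne' : (l[p]'(by omega)) ≠ "(" := by
        have := hne hlt
        simpa using this
      simp only [pvFindLLB, hsome, if_neg hne']
      norm_num
  | succ m ih =>
    intro fuel c p hrun hb hfuel
    obtain ⟨f, rfl⟩ : ∃ f, fuel = f + 1 := ⟨fuel - 1, by omega⟩
    have hp : p < l.length := by
      rcases hb with hb | ⟨hlt, _⟩ <;> omega
    have h0 : l[p] = "(" := by
      have := hrun 0 (by omega) (by omega : p + 0 < l.length)
      simpa using this
    have hsome : PySem.List.pyGet? l (↑p) = some l[p] := by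
      rw [PySem.List.pyGet?_natCast]
      exact List.getElem?_eq_getElem hp
    simp only [pvFindLLB, hsome, if_pos h0]
    have hrun' : ∀ j : Nat, j < m → ∀ _ : (p+1) + j < l.length, l[(p+1)+j] = "(" := by
      intro j hj hjl
      have e : p + 1 + j = p + (j+1) := by omega
      simp only [e] at hjl ⊢
      exact hrun (j+1) (by omega) hjl
    have hb' : (p+1) + m = l.length ∨ ((p+1) + m < l.length ∧ ∀ _ : (p+1) + m < l.length, l[(p+1)+m] ≠ "(") := by
      have e : p + 1 + m = p + (m+1) := by omega
      simp only [e]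
      exact hb
    have hrec := ih f (c+1) (p+1) hrun' hb' (by omega)
    have ecast : (↑p + 1 : Int) = ((p+1 : Nat) : Int) := by push_cast; ring
    rw [ecast, hrec]
    simp only [Prod.mk.injEq]
    constructor
    · push_cast; ring
    · push_cast; ring

theorem pvFindRB_run (l : List String) : ∀ (m : Nat) (fuel : Nat) (c : Int) (p : Nat)
    (hpm : p + m < l.length),
    (∀ j : Nat, j < m → ∀ _ : p + j < l.length, l[p+j] ≠ ")") →
    l[p+m] = ")" →
    m + 1 ≤ fuel →
    pvFindRB l c (↑p) fuel = (c + pvBal (l.take (p+m)) - pvBal (l.take p), ↑(p+m)) := by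
  intro m
  induction m with
  | zero =>
    intro fuel c p hpm _ hrb hfuel
    obtain ⟨f, rfl⟩ : ∃ f, fuel = f + 1 := ⟨fuel - 1, by omega⟩
    have hsome : PySem.List.pyGet? l (↑p) = some (l[p]'(by omega)) := by
      rw [PySem.List.pyGet?_natCast]
      exact List.getElem?_eq_getElem (by omega)
    have h0 : (l[p]'(by omega)) = ")" := by simpa using hrb
    simp only [pvFindRB, hsome, h0]
    simp
  | succ m ih =>
    intro fuel c p hpm hrun hrb hfuel
    obtain ⟨f, rfl⟩ : ∃ f, fuel = f + 1 := ⟨fuel - 1, by omega⟩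
    have hp : p < l.length := by omega
    have h0 : l[p] ≠ ")" := by
      have := hrun 0 (by omega) (by omega : p + 0 < l.length)
      simpa using this
    have hsome : PySem.List.pyGet? l (↑p) = some l[p] := by
      rw [PySem.List.pyGet?_natCast]
      exact List.getElem?_eq_getElem hp
    simp only [pvFindRB, hsome, ne_eq, if_pos h0]
    have hrun' : ∀ j : Nat, j < m → ∀ _ : (p+1) + j < l.length, l[(p+1)+j] ≠ ")" := by
      intro j hj hjl
      have e : p + 1 + j = p + (j+1) := by omega
      simp only [e] at hjl ⊢
      exact hrun (j+1) (by omega) hjl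
    have hpm' : (p+1) + m < l.length := by omega
    have hrb' : l[(p+1)+m]'hpm' = ")" := by
      have e : p + 1 + m = p + (m+1) := by omega
      simp only [e]
      exact hrb
    have hrec := ih f (if l[p] = "(" then c + 1 else c) (p+1) hpm' hrun' hrb' (by omega)
    have ecast : (↑p + 1 : Int) = ((p+1 : Nat) : Int) := by push_cast; ring
    rw [ecast, hrec]
    have hstep := pvBal_take_succ l p hp
    have hc : (if l[p] = "(" then c + 1 else c) = c + (pvBal (l.take (p+1)) - pvBal (l.take p)) := by
      by_cases h' : l[p] = "("
      · simp only [if_pos h']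
        simp [pvDelta, h'] at hstep
        omega
      · simp only [if_neg h']
        simp [pvDelta, h', h0] at hstep
        omega
    have e2 : p + 1 + m = p + (m+1) := by omega
    simp only [e2, Prod.mk.injEq]
    refine ⟨by omega, by trivial⟩

theorem pvALoop_eq (l : List String) (K : Nat) (hK : K < l.length)
    (hz : pvBal (l.take (K+1)) = 0)
    (hmin : ∀ j : Nat, j < K → pvBal (l.take (j+1)) ≠ 0) :
    ∀ (fuel p : Nat), p ≤ K → 0 ≤ pvBal (l.take (p+1)) → K - p + 1 ≤ fuel →
    pvALoop l (pvBal (l.take (p+1))) (↑p) fuel = ↑K := by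
  intro fuel
  induction fuel with
  | zero => intro p _ _ h3; omega
  | succ f ih =>
    intro p hpK hpos hfuel
    by_cases hb : pvBal (l.take (p+1)) > 0
    case neg =>
      simp only [pvALoop, if_neg hb]
      have hz0 : pvBal (l.take (p+1)) = 0 := by omega
      have hpK' : p = K := by
        by_contra hne
        exact hmin p (by omega) hz0
      rw [hpK']
    case pos =>
      simp only [pvALoop, if_pos hb]
      have hpltK : p < K := by
        rcases Nat.lt_or_ge p K with h | h
        · exact h
        · have he : p = K := by omega
          rw [he] at hb
          omega
      have hfree : ∀ j : Nat, j < pvRunLen (fun s => s != ")") (l.drop (p+1)) →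
          ∀ _ : p + 1 + j < l.length, l[p+1+j] ≠ ")" := by
        intro j hj hjl
        have := pvRunLen_getElem (fun s => s != ")") (l.drop (p+1)) j hj (by simp; omega)
        simp only [List.getElem_drop] at this
        simpa using this
      have hqK : p + 1 + pvRunLen (fun s => s != ")") (l.drop (p+1)) ≤ K := by
        by_contra hgt
        push_neg at hgt
        have hmono := pvBal_mono l (p+1) (K - p) (by omega) (by
          intro j hj1 hj2 hjl
          have := hfree (j - (p+1)) (by omega) (by omega)
          have e : p + 1 + (j - (p+1)) = j := by omega
          simp only [e] at this
          exact this)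
        have e : (p+1) + (K - p) = K + 1 := by omega
        rw [e] at hmono
        omega
      have hmlt : pvRunLen (fun s => s != ")") (l.drop (p+1)) < (l.drop (p+1)).length := by
        simp
        omega
      have hq : l[p + 1 + pvRunLen (fun s => s != ")") (l.drop (p+1))]'(by omega) = ")" := by
        have := pvRunLen_boundary (fun s => s != ")") (l.drop (p+1)) hmlt
        simp only [List.getElem_drop] at this
        simpa using this
      have hrb := pvFindRB_run l (pvRunLen (fun s => s != ")") (l.drop (p+1))) (l.length + 1) 0 (p+1)
        (by omega)
        (by
          intro j hj hjl
          have e : p + 1 + j = (p+1) + j := by omega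
          exact hfree j hj hjl)
        (by exact hq)
        (by
          have := pvRunLen_le (fun s => s != ")") (l.drop (p+1))
          simp at this
          omega)
      have ecast : (↑p + 1 : Int) = ((p+1 : Nat) : Int) := by push_cast; ring
      rw [ecast, hrb]
      have hqlen : p + 1 + pvRunLen (fun s => s != ")") (l.drop (p+1)) < l.length := by omega
      have hstepq := pvBal_take_succ l (p + 1 + pvRunLen (fun s => s != ")") (l.drop (p+1))) hqlen
      have hdq : pvDelta (l[p + 1 + pvRunLen (fun s => s != ")") (l.drop (p+1))]'hqlen) = -1 := by
        simp [pvDelta, hq]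
      have hmono2 := pvBal_mono l (p+1) (pvRunLen (fun s => s != ")") (l.drop (p+1))) (by omega) (by
        intro j hj1 hj2 hjl
        have := hfree (j - (p+1)) (by omega) (by omega)
        have e : p + 1 + (j - (p+1)) = j := by omega
        simp only [e] at this
        exact this)
      have earg : pvBal (l.take (p+1)) + (0 + pvBal (l.take (p + 1 + pvRunLen (fun s => s != ")") (l.drop (p+1)))) - pvBal (l.take (p+1))) - 1
          = pvBal (l.take ((p + 1 + pvRunLen (fun s => s != ")") (l.drop (p+1))) + 1)) := by
        omega
      rw [earg]
      exact ih (p + 1 + pvRunLen (fun s => s != ")") (l.drop (p+1))) (by omega) (by omega) (by omega)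

-- B's for-loop reaches the same minimal closing index and returns the same prefix
theorem bGather_eq (l : List String) (K : Nat) (hK : K < l.length)
    (hz : pvBal (l.take (K+1)) = 0)
    (hmin : ∀ j : Nat, j < K → pvBal (l.take (j+1)) ≠ 0) :
    ∀ (n i : Nat), i ≤ K → K - i < n →
    bGather (pvBal (l.take i)) ((l.take i).reverse) (l.drop i) = l.take (K+1) := by
  intro n
  induction n with
  | zero => intro i _ h2; omega
  | succ f ih =>
    intro i hiK hfuel
    have hi : i < l.length := by omega
    have hdropc : l.drop i = l[i] :: l.drop (i+1) := List.drop_eq_getElem_cons hi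
    rw [hdropc, bGather]
    have hd : (if l[i] = "(" then pvBal (l.take i) + 1
        else if l[i] = ")" then pvBal (l.take i) - 1 else pvBal (l.take i))
        = pvBal (l.take (i+1)) := by
      rw [pvBal_take_succ l i hi]
      unfold pvDelta
      split_ifs <;> ring
    simp only [hd]
    have hacc : l[i] :: (l.take i).reverse = (l.take (i+1)).reverse := by
      have h2 : l.take (i+1) = l.take i ++ [l[i]] := by
        rw [List.take_add_one, List.getElem?_eq_getElem hi]
        rfl
      rw [h2, List.reverse_append]
      simp
    by_cases hz2 : pvBal (l.take (i+1)) = 0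
    · rw [if_pos hz2]
      have he : i = K := by
        by_contra hne
        exact hmin i (by omega) hz2
      subst he
      rw [hacc, List.reverse_reverse]
    · rw [if_neg hz2]
      have hilt : i < K := by
        by_contra h
        have he : i = K := by omega
        rw [he] at hz2
        exact hz2 hz
      rw [hacc]
      exact ih (i+1) (by omega) (by omega)

-- ===== VERDICT (by name: the statement is the Claim_ definition above) =====
theorem getOneStatement_spec : Claim_equal_getOneStatement := by
  unfold Claim_equal_getOneStatement
  intro l0 _hdom hpre
  unfold Spec_getOneStatement
  obtain ⟨hne, hbal⟩ := hpre
  cases l0 with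
  | nil => exact absurd rfl hne
  | cons s rest =>
  by_cases hf : pvIsFloat s = true
  · have hbf : bFloat s = true := by rw [← float_eq]; exact hf
    simp [getOneStatement, getOneStatement_alt, hf, hbf]
  · have hf' : pvIsFloat s = false := by revert hf; cases pvIsFloat s <;> simp
    have hbf' : bFloat s = false := by rw [← float_eq]; exact hf'
    by_cases hpar : s = "("
    case neg =>
      have hllb0 : pvFindLLB (s :: rest) 0 0 ((s :: rest).length + 1) = (0, -1) := by
        have h := pvFindLLB_run (s :: rest) 0 ((s :: rest).length + 1) 0 0
          (by intro j hj; omega)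
          (Or.inr ⟨by simp, by intro _; simpa using hpar⟩)
          (by omega)
        simpa using h
      have hloop : pvALoop (s :: rest) 0 (-1) ((s :: rest).length + 1) = -1 := by
        simp [pvALoop]
      simp only [getOneStatement, getOneStatement_alt, hf', hbf', Bool.false_eq_true, if_false]
      rw [hllb0]
      rw [hloop]
      norm_num
      rw [if_neg (by simpa using hpar)]
      simp [PySem.List.slice_to]
    case pos =>
      subst hpar
      have hex := hbal (by simp)
      simp only [List.mem_range] at hex
      obtain ⟨k, hklen, hk0⟩ := hex
      have hexists : ∃ n : Nat, pvBal ((("(" : String) :: rest).take (n+1)) = 0 := ⟨k, hk0⟩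
      have hKle : Nat.find hexists ≤ k := Nat.find_min' hexists hk0
      have hKz := Nat.find_spec hexists
      have hKmin : ∀ j : Nat, j < Nat.find hexists → pvBal ((("(" : String) :: rest).take (j+1)) ≠ 0 :=
        fun j hj => Nat.find_min hexists hj
      have hK : Nat.find hexists < (("(" : String) :: rest).length := by
        simp only [List.length_cons] at hklen ⊢
        omega
      have hr1 : 1 ≤ pvRunLen (fun t => t == "(") (("(" : String) :: rest) := by
        rw [pvRunLen_cons]
        simp
      have hrle := pvRunLen_le (fun t => t == "(") (("(" : String) :: rest)
      have hbal_run : ∀ n : Nat, n ≤ pvRunLen (fun t => t == "(") (("(" : String) :: rest) →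
          pvBal ((("(" : String) :: rest).take n) = ↑n := by
        intro n
        induction n with
        | zero => intro _; simp [pvBal]
        | succ n ih =>
          intro hn
          have hnl : n < (("(" : String) :: rest).length := by omega
          rw [pvBal_take_succ _ n hnl, ih (by omega)]
          have hel : (("(" : String) :: rest)[n] = "(" := by
            have := pvRunLen_getElem (fun t => t == "(") (("(" : String) :: rest) n (by omega) hnl
            simpa using this
          simp only [pvDelta, hel]
          push_cast
          ring
      have hKr : pvRunLen (fun t => t == "(") (("(" : String) :: rest) ≤ Nat.find hexists + 1 := by
        by_contra h
        push_neg at h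
        have := hbal_run (Nat.find hexists + 1) (by omega)
        omega
      have hboundary : (0 : Nat) + pvRunLen (fun t => t == "(") (("(" : String) :: rest) = (("(" : String) :: rest).length ∨
          ((0 : Nat) + pvRunLen (fun t => t == "(") (("(" : String) :: rest) < (("(" : String) :: rest).length ∧
           ∀ _ : (0 : Nat) + pvRunLen (fun t => t == "(") (("(" : String) :: rest) < (("(" : String) :: rest).length,
             (("(" : String) :: rest)[(0 : Nat) + pvRunLen (fun t => t == "(") (("(" : String) :: rest)] ≠ "(") := by
        simp only [Nat.zero_add]
        rcases Nat.lt_or_ge (pvRunLen (fun t => t == "(") (("(" : String) :: rest)) (("(" : String) :: rest).length with h | h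
        · right
          refine ⟨h, fun _ => ?_⟩
          have := pvRunLen_boundary (fun t => t == "(") (("(" : String) :: rest) h
          simpa using this
        · left
          omega
      have hllb0 : pvFindLLB (("(" : String) :: rest) 0 0 ((("(" : String) :: rest).length + 1)
          = ((pvRunLen (fun t => t == "(") (("(" : String) :: rest) : Int),
             (pvRunLen (fun t => t == "(") (("(" : String) :: rest) : Int) - 1) := by
        have h := pvFindLLB_run (("(" : String) :: rest) (pvRunLen (fun t => t == "(") (("(" : String) :: rest))
          ((("(" : String) :: rest).length + 1) 0 0
          (by
            intro j hj hjl
            have := pvRunLen_getElem (fun t => t == "(") (("(" : String) :: rest) j hj (by simpa using hjl)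
            simpa using this)
          hboundary
          (by omega)
        simpa using h
      have hAv := pvALoop_eq (("(" : String) :: rest) (Nat.find hexists) hK hKz hKmin
        ((("(" : String) :: rest).length + 1)
        (pvRunLen (fun t => t == "(") (("(" : String) :: rest) - 1)
        (by omega)
        (by
          rw [show pvRunLen (fun t => t == "(") (("(" : String) :: rest) - 1 + 1 = pvRunLen (fun t => t == "(") (("(" : String) :: rest) from by omega]
          rw [hbal_run _ (le_refl _)]
          positivity)
        (by omega)
      rw [show pvRunLen (fun t => t == "(") (("(" : String) :: rest) - 1 + 1 = pvRunLen (fun t => t == "(") (("(" : String) :: rest) from by omega] at hAv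
      rw [hbal_run _ (le_refl _)] at hAv
      have ecast : ((pvRunLen (fun t => t == "(") (("(" : String) :: rest) - 1 : Nat) : Int) = (pvRunLen (fun t => t == "(") (("(" : String) :: rest) : Int) - 1 := by
        omega
      rw [ecast] at hAv
      have hBv : bGather 0 [] (("(" : String) :: rest)
          = (("(" : String) :: rest).take (Nat.find hexists + 1) := by
        have h := bGather_eq (("(" : String) :: rest) (Nat.find hexists) hK hKz hKmin
          (Nat.find hexists + 1) 0 (by omega) (by omega)
        simpa [pvBal] using h
      simp only [getOneStatement, getOneStatement_alt, hf', hbf', Bool.false_eq_true, if_false,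
        ne_eq, not_true_eq_false]
      rw [hllb0, hAv, hBv]
      rw [show (Nat.find hexists : Int) + 1 = ((Nat.find hexists + 1 : Nat) : Int) from by push_cast; ring]
      rw [PySem.List.slice_zero_start, PySem.List.slice_to_natCast]
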